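-- pv_equiv track=rewrite | github.com/ov357/gg3 | gg3.py | compile_cbs
-- ===== SOURCE A (Python) =====
-- def compile_cbs(cb=[]):
--     # compile a srie of unitary combs into champs reduits
--     a = []
--     cb = sorted(cb)
--     for i in cb:
--         if i[:3] in a:
--             pass
--         else:
--             a.append(i[:3])
--     s = ''
--     mem = cb[0][:3]
--     s = str(mem)+' / '
--     tbstr = []
--     for e,i in enumerate(cb):
--         if i[:3] == mem:
--             s += str(i[3])+' - '
--         else:
--             tbstr.append(s)
--             s = ''
--             s = str(i[:3])+' / '+str(i[3])+' - '
--             mem = i[:3]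
--     tbstr.append(s)
--     return tbstr
-- ===== SOURCE B (Python) =====
-- def compile_cbs(cb=[]):
--     # group the sorted combs by their 3-char prefix with one dict pass
--     d = {}
--     for i in sorted(cb):
--         d[i[:3]] = d.get(i[:3], '') + i[3] + ' - '
--     return [p + ' / ' + v for p, v in d.items()]
-- ===== Notes on version B (the rewrite author's own statement) =====
-- stated objective: simpler
-- what changed: B drops A's dead prefix-collecting loop and replaces the mem/flush state-machine over enumerate(cb) by a single dict-grouping pass over the sorted list followed by a comprehension over the dict items.
-- outside the precondition, e.g. on compile_cbs([]): A raises IndexError, B returns []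
-- crash fix: On the empty list A raises IndexError at cb[0]; B returns the empty list. — e.g. on compile_cbs([]): A raises IndexError, B returns []
import Mathlib
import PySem

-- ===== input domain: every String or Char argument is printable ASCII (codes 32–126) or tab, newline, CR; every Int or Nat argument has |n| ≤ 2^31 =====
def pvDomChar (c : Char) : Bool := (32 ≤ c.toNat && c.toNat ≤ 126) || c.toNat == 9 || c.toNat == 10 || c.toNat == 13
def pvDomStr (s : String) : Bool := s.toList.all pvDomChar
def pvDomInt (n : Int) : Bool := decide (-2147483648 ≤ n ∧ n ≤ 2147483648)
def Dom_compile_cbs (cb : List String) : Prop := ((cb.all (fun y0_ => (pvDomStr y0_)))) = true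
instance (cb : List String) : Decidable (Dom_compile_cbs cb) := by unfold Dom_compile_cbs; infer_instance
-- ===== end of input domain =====

-- B replaces A's dead prefix-collecting loop and mem/flush state machine by a single
-- dict-grouping pass plus a comprehension over its items (objective: simpler).

-- ===== PORT A =====
def compile_cbs (cb : List String) : List String :=
  let cbs : List (List Char) := (PySem.List.sorted cb (fun x => x) false).map String.toList
  -- the dead variable `a` of the source, kept literally
  let _a : List (List Char) := cbs.foldl
    (fun a i => if PySem.List.slice i none (some 3) ∈ a then a
                else a ++ [PySem.List.slice i none (some 3)]) []
  match PySem.List.pyGet? cbs 0 with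
  | none => []      -- Python raises IndexError at cb[0]; excluded by Pre_compile_cbs
  | some c0 =>
    let mem := PySem.List.slice c0 none (some 3)
    let s := mem ++ [' ', '/', ' ']
    let fin := (PySem.List.enumerate cbs).foldl
      (fun (st : List Char × List Char × List (List Char)) ei =>
        if PySem.List.slice ei.2 none (some 3) = st.2.1 then
          (st.1 ++ [PySem.List.pyGetD ei.2 3 ' ', ' ', '-', ' '], st.2.1, st.2.2)
        else
          (PySem.List.slice ei.2 none (some 3) ++
             [' ', '/', ' ', PySem.List.pyGetD ei.2 3 ' ', ' ', '-', ' '],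
           PySem.List.slice ei.2 none (some 3), st.2.2 ++ [st.1]))
      (s, mem, [])
    (fin.2.2 ++ [fin.1]).map (fun t => String.ofList t)

-- ===== PORT B =====
def compile_cbs_alt (cb : List String) : List String :=
  let d : PySem.Dict (List Char) (List Char) :=
    ((PySem.List.sorted cb (fun x => x) false).map String.toList).foldl
      (fun d i =>
        d.insert (PySem.List.slice i none (some 3))
          (d.getD (PySem.List.slice i none (some 3)) [] ++
            [PySem.List.pyGetD i 3 ' ', ' ', '-', ' ']))
      PySem.Dict.empty
  d.items.map (fun pv => String.ofList (pv.1 ++ [' ', '/', ' '] ++ pv.2))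

-- ===== PRECONDITION & SPEC =====
-- Pre_ excludes exactly the inputs where Python A raises: the empty list (IndexError at cb[0])
-- and lists containing a string shorter than 4 characters (IndexError at i[3]).
def Pre_compile_cbs (cb : List String) : Prop :=
  cb ≠ [] ∧ ∀ s ∈ cb, 4 ≤ s.toList.length
instance (cb : List String) : Decidable (Pre_compile_cbs cb) := by unfold Pre_compile_cbs; infer_instance
def pvWitness_compile_cbs : List String := ["abcd", "abce", "xyz1"]

-- On the empty list A raises IndexError (cb[0]); B returns the empty list.
def Raises_compile_cbs (cb : List String) : Prop := cb = []
instance (cb : List String) : Decidable (Raises_compile_cbs cb) := by unfold Raises_compile_cbs; infer_instance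
def pvRaiseWitness_compile_cbs : List String := []
def pvRaiseWitnessOut_compile_cbs : List String := []

def Spec_compile_cbs (cb : List String) (out : List String) : Prop := out = compile_cbs_alt cb
instance (cb : List String) (out : List String) : Decidable (Spec_compile_cbs cb out) := by unfold Spec_compile_cbs; infer_instance

-- ===== CLAIM (what is proved, stated in full; the proofs are below) =====
def Claim_equal_compile_cbs : Prop := ∀ (cb : List String), Dom_compile_cbs cb → Pre_compile_cbs cb → Spec_compile_cbs cb (compile_cbs cb)
def Claim_raises_compile_cbs : Prop := (∀ (cb : List String), Dom_compile_cbs cb → Raises_compile_cbs cb → ¬ Pre_compile_cbs cb) ∧ (Dom_compile_cbs (pvRaiseWitness_compile_cbs) ∧ Raises_compile_cbs (pvRaiseWitness_compile_cbs) ∧ compile_cbs_alt (pvRaiseWitness_compile_cbs) = pvRaiseWitnessOut_compile_cbs)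

-- ===== LEMMAS AND PROOFS =====

-- the 3-character prefix i[:3] and the chunk str(i[3]) + ' - ' both programs build from an element
def pvK (i : List Char) : List Char := PySem.List.slice i none (some 3)
def pvV (i : List Char) : List Char := [PySem.List.pyGetD i 3 ' ', ' ', '-', ' ']

lemma pvK_def (i : List Char) : PySem.List.slice i none (some 3) = pvK i := rfl
lemma pvV_def (i : List Char) : [PySem.List.pyGetD i 3 ' ', ' ', '-', ' '] = pvV i := rfl

-- merge a (prefix, chunks) pair into the run list whose head it may extend
def pvMerge (pw : List Char × List Char) (rs : List (List Char × List Char)) :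
    List (List Char × List Char) :=
  match rs with
  | [] => [pw]
  | (q, u) :: r => if pw.1 = q then (pw.1, pw.2 ++ u) :: r else pw :: (q, u) :: r

-- the maximal runs of equal 3-prefixes of a list, with their concatenated chunks
def pvRuns : List (List Char) → List (List Char × List Char)
  | [] => []
  | i :: l => pvMerge (pvK i, pvV i) (pvRuns l)

-- equal elements occur only adjacently
def pvGrouped : List (List Char) → Prop
  | [] => True
  | [_] => True
  | x :: y :: r => (x = y ∨ x ∉ y :: r) ∧ pvGrouped (y :: r)

lemma pvMerge_merge (p w v : List Char) (rs : List (List Char × List Char)) :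
    pvMerge (p, w) (pvMerge (p, v) rs) = pvMerge (p, w ++ v) rs := by
  cases rs with
  | nil => simp [pvMerge]
  | cons qu r =>
    obtain ⟨q, u⟩ := qu
    by_cases h : p = q <;> simp [pvMerge, h]

lemma pvMerge_of_ne {p q : List Char} (h : p ≠ q) (w u : List Char)
    (rs : List (List Char × List Char)) :
    pvMerge (p, w) (pvMerge (q, u) rs) = (p, w) :: pvMerge (q, u) rs := by
  cases rs with
  | nil => simp [pvMerge, h]
  | cons qu r =>
    obtain ⟨q', u'⟩ := qu
    by_cases h' : q = q'
    · subst h'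
      simp [pvMerge, h]
    · simp [pvMerge, h, h']

lemma pvNilLe (l : List Char) : ([] : List Char) ≤ l := by
  cases l with
  | nil => exact le_refl _
  | cons x xs => exact le_of_lt (List.Lex.nil)

lemma pvTakeMono {a b : List Char} (h : a ≤ b) (n : Nat) : a.take n ≤ b.take n := by
  rcases lt_or_eq_of_le h with hlt | rfl
  · have hx : List.Lex (· < ·) a b := hlt
    clear h hlt
    induction hx generalizing n with
    | nil => simpa using pvNilLe _
    | @cons x l1 l2 _ ih =>
      cases n with
      | zero => exact le_refl _
      | succ m => simpa [List.take] using List.cons_le_cons x (ih m)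
    | @rel x l1 y l2 hxy =>
      cases n with
      | zero => exact le_refl _
      | succ m => exact le_of_lt (List.Lex.rel hxy)
  · exact le_refl _

lemma pvGroupedOfPairwise : ∀ (ks : List (List Char)), ks.Pairwise (· ≤ ·) → pvGrouped ks
  | [], _ => trivial
  | [_], _ => trivial
  | x :: y :: r, h => by
    obtain ⟨hx, hyr⟩ := List.pairwise_cons.mp h
    refine ⟨?_, pvGroupedOfPairwise _ hyr⟩
    by_cases hxy : x = y
    · exact Or.inl hxy
    · refine Or.inr (fun hmem => ?_)
      rcases List.mem_cons.mp hmem with h1 | h2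
      · exact hxy h1
      · have hyx : y ≤ x := (List.pairwise_cons.mp hyr).1 x h2
        exact hxy (le_antisymm (hx y (by simp)) hyx)

lemma pvLoopB : ∀ (l : List (List Char)) (d : PySem.Dict (List Char) (List Char))
    (D : List (List Char × List Char)) (p w : List Char),
    d.items = D ++ [(p, w)] →
    d.keys.Nodup →
    (∀ i ∈ l, pvK i ∉ D.map Prod.fst) →
    pvGrouped (p :: l.map pvK) →
    (l.foldl (fun d i => d.insert (pvK i) (d.getD (pvK i) [] ++ pvV i)) d).items
      = D ++ pvMerge (p, w) (pvRuns l) := by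
  intro l
  induction l with
  | nil => intro d D p w hitems _ _ _; simpa [pvRuns, pvMerge] using hitems
  | cons i l ih =>
    intro d D p w hitems hnd hfresh hgr
    have hkeys : d.keys = D.map Prod.fst ++ [p] := by
      simp [PySem.Dict.keys, hitems]
    have hfresh_i : pvK i ∉ D.map Prod.fst := hfresh i (by simp)
    simp only [List.map_cons, pvGrouped] at hgr
    obtain ⟨hhd, htl⟩ := hgr
    simp only [List.foldl_cons]
    by_cases hip : pvK i = p
    · -- same prefix: the dict entry at p grows in place
      have hcont : d.contains (pvK i) = true := by
        rw [PySem.Dict.contains_iff_mem_keys, hkeys, hip]; simp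
      have hget : d.getD (pvK i) [] = w := by
        rw [hip]
        exact PySem.Dict.getD_of_mem_items d (by rw [hitems]; simp) hnd []
      have hitems' : (d.insert (pvK i) (d.getD (pvK i) [] ++ pvV i)).items
          = D ++ [(p, w ++ pvV i)] := by
        rw [hget, PySem.Dict.items_insert_of_contains d _ hcont, hitems, hip]
        rw [List.map_append]
        congr 1
        · rw [List.map_congr_left (g := id) ?_, List.map_id]
          intro q hq
          have hq1 : q.1 ≠ p := by
            intro hqp
            exact (hip ▸ hfresh_i) (hqp ▸ List.mem_map_of_mem hq)
          simp [hq1]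
        · simp
      have hgr' : pvGrouped (p :: l.map pvK) := by rw [← hip]; exact htl
      have := ih _ D p (w ++ pvV i) hitems' (PySem.Dict.nodup_keys_insert d _ _ hnd)
        (fun j hj => hfresh j (by simp [hj])) hgr'
      rw [this, pvRuns, ← hip, pvMerge_merge]
    · -- new prefix: a fresh entry is appended
      have hcont : d.contains (pvK i) = false := by
        rw [Bool.eq_false_iff, Ne, PySem.Dict.contains_iff_mem_keys, hkeys]
        simp only [List.mem_append, List.mem_singleton]
        rintro (h1 | h2)
        · exact hfresh_i h1
        · exact hip h2
      have hget : d.getD (pvK i) [] = [] := PySem.Dict.getD_of_not_contains d _ hcont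
      have hitems' : (d.insert (pvK i) (d.getD (pvK i) [] ++ pvV i)).items
          = (D ++ [(p, w)]) ++ [(pvK i, pvV i)] := by
        rw [hget, PySem.Dict.items_insert_of_not_contains d _ hcont, hitems]
        simp
      have hpnot : p ∉ l.map pvK := by
        rcases hhd with h1 | h2
        · exact absurd h1.symm hip
        · exact fun hm => h2 (by simp [hm])
      have := ih _ (D ++ [(p, w)]) (pvK i) (pvV i) hitems'
        (PySem.Dict.nodup_keys_insert d _ _ hnd)
        (fun j hj => by
          simp only [List.map_append, List.mem_append]
          rintro (h1 | h2)
          · exact hfresh j (by simp [hj]) h1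
          · simp at h2
            exact hpnot (h2 ▸ List.mem_map_of_mem hj)) htl
      rw [this, pvRuns, pvMerge_of_ne (Ne.symm hip) _ _]
      simp

def pvStepA (st : List Char × List Char × List (List Char)) (i : List Char) :
    List Char × List Char × List (List Char) :=
  if pvK i = st.2.1 then
    (st.1 ++ pvV i, st.2.1, st.2.2)
  else
    (pvK i ++ ' ' :: '/' :: ' ' :: pvV i, pvK i, st.2.2 ++ [st.1])

lemma pvLoopA : ∀ (l : List (List Char)) (p w : List Char) (t : List (List Char)),
    (l.foldl pvStepA (p ++ ' ' :: '/' :: ' ' :: w, p, t)).2.2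
      ++ [(l.foldl pvStepA (p ++ ' ' :: '/' :: ' ' :: w, p, t)).1]
    = t ++ (pvMerge (p, w) (pvRuns l)).map (fun pw => pw.1 ++ ' ' :: '/' :: ' ' :: pw.2) := by
  intro l
  induction l with
  | nil => intro p w t; simp [pvMerge, pvRuns]
  | cons i l ih =>
    intro p w t
    simp only [List.foldl_cons]
    by_cases hip : pvK i = p
    · have hstep : pvStepA (p ++ ' ' :: '/' :: ' ' :: w, p, t) i
          = (p ++ ' ' :: '/' :: ' ' :: (w ++ pvV i), p, t) := by
        simp [pvStepA, hip]
      rw [hstep, ih p (w ++ pvV i) t, pvRuns, ← hip, pvMerge_merge]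
    · have hstep : pvStepA (p ++ ' ' :: '/' :: ' ' :: w, p, t) i
          = (pvK i ++ ' ' :: '/' :: ' ' :: pvV i, pvK i, t ++ [p ++ ' ' :: '/' :: ' ' :: w]) := by
        simp [pvStepA, hip]
      rw [hstep, ih (pvK i) (pvV i) (t ++ [p ++ ' ' :: '/' :: ' ' :: w]),
        pvRuns, pvMerge_of_ne (Ne.symm hip) _ _]
      simp

lemma pvFoldEnumA :
    ∀ (xs : List (List Char)) (k : Int) (init : List Char × List Char × List (List Char)),
      (PySem.List.enumerate xs k).foldl (fun st ei => pvStepA st ei.2) init = xs.foldl pvStepA init := by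
  intro xs
  induction xs with
  | nil => intro k init; simp [PySem.List.enumerate_nil]
  | cons x xs ih =>
    intro k init
    rw [PySem.List.enumerate_cons]
    simpa using ih (k + 1) (pvStepA init x)

lemma pvMerge_nil_runs (h : List Char) (l : List (List Char)) :
    pvMerge (pvK h, []) (pvRuns (h :: l)) = pvRuns (h :: l) := by
  rw [pvRuns, pvMerge_merge]
  simp

theorem pvMain (cb : List String) (hne : cb ≠ []) : compile_cbs cb = compile_cbs_alt cb := by
  have hsne : PySem.List.sorted cb (fun x => x) false ≠ [] := by
    rw [Ne, PySem.List.sorted_eq_nil_iff]; exact hne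
  obtain ⟨h, t, hL⟩ := List.exists_cons_of_ne_nil hsne
  have hpw : (PySem.List.sorted cb (fun x => x) false).Pairwise (fun a b : String => a ≤ b) :=
    PySem.List.sorted_pairwise cb _ 
  rw [hL] at hpw
  have hgr : pvGrouped (pvK h.toList :: (t.map String.toList).map pvK) := by
    have := pvGroupedOfPairwise (((h :: t).map String.toList).map pvK) ?_
    · simpa using this
    · rw [List.map_map]
      refine List.Pairwise.map _ ?_ hpw
      intro a b hab
      have h2 := pvTakeMono (String.le_iff_toList_le.mp hab) ((3:Int).toNat)
      rw [Function.comp_def]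
      simp only [pvK, PySem.List.slice_to _ (show (0:Int) ≤ 3 by norm_num)]
      exact h2
  rw [compile_cbs, compile_cbs_alt, hL]
  simp only [List.map_cons]
  have hget0 : PySem.List.pyGet? (h.toList :: List.map String.toList t) 0 = some h.toList := by
    simp [PySem.List.pyGet?, PySem.List.pyIdx?]
  simp only [hget0]
  have hsa : (fun (st : List Char × List Char × List (List Char)) (ei : Int × List Char) =>
      if PySem.List.slice ei.2 none (some 3) = st.2.1 then
        (st.1 ++ [PySem.List.pyGetD ei.2 3 ' ', ' ', '-', ' '], st.2.1, st.2.2)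
      else
        (PySem.List.slice ei.2 none (some 3) ++
           [' ', '/', ' ', PySem.List.pyGetD ei.2 3 ' ', ' ', '-', ' '],
         PySem.List.slice ei.2 none (some 3), st.2.2 ++ [st.1]))
      = (fun st ei => pvStepA st ei.2) := rfl
  rw [hsa, pvFoldEnumA]
  simp only [pvK_def, pvV_def]
  rw [pvLoopA (h.toList :: List.map String.toList t) (pvK h.toList) [] [],
    pvMerge_nil_runs]
  rw [List.foldl_cons]
  have hd1 : (PySem.Dict.empty.insert (pvK h.toList)
      (PySem.Dict.empty.getD (pvK h.toList) [] ++ pvV h.toList)).items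
      = [] ++ [(pvK h.toList, pvV h.toList)] := by
    rw [PySem.Dict.items_insert_of_not_contains _ _ (PySem.Dict.contains_empty _),
      PySem.Dict.getD_empty]
    rfl
  rw [pvLoopB (List.map String.toList t) _ [] (pvK h.toList) (pvV h.toList) hd1
    (PySem.Dict.nodup_keys_insert _ _ _ PySem.Dict.nodup_keys_empty)
    (by simp) hgr]
  rw [pvRuns]
  simp only [List.nil_append, List.map_map]
  refine List.map_congr_left ?_
  intro pw _
  simp

-- ===== VERDICT (by name: the statement is the Claim_ definition above) =====
theorem compile_cbs_spec : Claim_equal_compile_cbs := by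
  intro cb _ hpre
  unfold Spec_compile_cbs
  exact pvMain cb hpre.1

@[simp] theorem compile_cbs_raises : Claim_raises_compile_cbs := by
  unfold Claim_raises_compile_cbs
  exact ⟨by intro cb _ h hp; exact hp.1 h, by decide⟩
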